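-- pv_equiv track=rewrite | github.com/AOSTern/excercises | generators.py | generate_seat_letters
-- ===== SOURCE A (Python) =====
-- def generate_seat_letters(number):
--     """Generate a series of letters for airline seats.
--
--     :param number: int - total number of seat letters to be generated.
--     :return: generator - generator that yields seat letters.
--
--     Seat letters are generated from A to D.
--     After D it should start again with A.
--
--     Example: A, B, C, D
--
--     """
--
--     counter = 1
--     if int(number) <= 0:
--         return ""
--     while counter <= number:
--         if counter == 1 or counter % 4 == 1:
--             seat = "A"
--         if counter == 2 or counter % 4 == 2:
--             seat = "B"
--         if counter == 3 or counter % 4 == 3: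
--             seat = "C"
--         if counter == 4 or counter % 4 == 0:
--             seat = "D"
--         counter += 1
--         yield seat
-- ===== SOURCE B (Python) =====
-- def generate_seat_letters(number):
--     """Generate seat letters by building whole A-D blocks at once:
--     number // 4 full "ABCD" blocks plus a prefix of "ABCD" for the remainder,
--     then yielding the prepared string character by character."""
--     if int(number) <= 0:
--         return ""
--     full, rem = divmod(number, 4)
--     letters = "ABCD" * full + "ABCD"[:rem]
--     yield from letters
-- ===== Notes on version B (the rewrite author's own statement) =====
-- stated objective: alternative
-- what changed: Instead of a while loop that recomputes each seat letter from the counter with a chain of overlapping if-tests, B splits number by divmod into full cycles and a remainder, materialises the whole output at once as that many repetitions of the seat block plus a prefix of it, and yields from the prepared string.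
import Mathlib
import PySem

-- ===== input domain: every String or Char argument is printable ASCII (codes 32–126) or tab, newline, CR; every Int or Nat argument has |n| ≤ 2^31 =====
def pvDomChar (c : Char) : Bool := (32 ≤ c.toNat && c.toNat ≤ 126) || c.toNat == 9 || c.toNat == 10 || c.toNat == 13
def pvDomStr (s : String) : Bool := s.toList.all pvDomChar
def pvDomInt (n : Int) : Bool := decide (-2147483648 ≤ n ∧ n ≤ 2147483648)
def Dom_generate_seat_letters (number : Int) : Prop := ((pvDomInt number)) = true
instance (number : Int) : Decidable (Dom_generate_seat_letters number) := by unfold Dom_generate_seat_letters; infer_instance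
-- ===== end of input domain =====

-- B builds the whole output at once: number // 4 full "ABCD" blocks plus a prefix of "ABCD"
-- of length number % 4, instead of A's while loop recomputing each letter with an if-chain (alternative).

-- ===== PORT A =====
-- the four consecutive `if` statements of A's loop body, threading the previous `seat`
def pvSeatA (counter : Int) (seat : String) : String :=
  let s1 := if counter = 1 ∨ PySem.Int.mod counter 4 = 1 then "A" else seat
  let s2 := if counter = 2 ∨ PySem.Int.mod counter 4 = 2 then "B" else s1
  let s3 := if counter = 3 ∨ PySem.Int.mod counter 4 = 3 then "C" else s2
  let s4 := if counter = 4 ∨ PySem.Int.mod counter 4 = 0 then "D" else s3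
  s4

-- the `while counter <= number` loop, collecting the yielded seats
def pvSeatLoopA (number counter : Int) (seat : String) : List String :=
  if counter ≤ number then
    let s := pvSeatA counter seat
    s :: pvSeatLoopA number (counter + 1) s
  else []
termination_by (number + 1 - counter).toNat
decreasing_by omega

def generate_seat_letters (number : Int) : List String :=
  if number ≤ 0 then []          -- `return ""` inside a generator: yields nothing
  else pvSeatLoopA number 1 ""

-- ===== PORT B =====
-- `"ABCD" * full` (full ≥ 0 here): flatten of full copies of the block; `"ABCD"[:rem]`: slice;
-- `yield from letters`: each character of a str is yielded as a 1-char str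
def generate_seat_letters_alt (number : Int) : List String :=
  if number ≤ 0 then []
  else
    match PySem.Int.divmod? number 4 with
    | some (full, rem) =>
        let letters : List Char :=
          (List.replicate full.toNat "ABCD".toList).flatten
            ++ PySem.List.slice "ABCD".toList none (some rem)
        letters.map (fun c => String.ofList [c])
    | none => []                 -- unreachable: divisor 4 ≠ 0

-- ===== PRECONDITION & SPEC =====
def Spec_generate_seat_letters (number : Int) (out : List String) : Prop := out = generate_seat_letters_alt number
instance (number : Int) (out : List String) : Decidable (Spec_generate_seat_letters number out) := by unfold Spec_generate_seat_letters; infer_instance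

-- ===== CLAIM (what is proved, stated in full; the proofs are below) =====
def Claim_equal_generate_seat_letters : Prop := ∀ (number : Int), Dom_generate_seat_letters number → Spec_generate_seat_letters number (generate_seat_letters number)

-- ===== LEMMAS AND PROOFS =====

-- the letter at position (k % 4) of "ABCD", written out
def pvChar (r : Nat) : Char :=
  if r = 0 then 'A' else if r = 1 then 'B' else if r = 2 then 'C' else 'D'

-- the letter A's loop yields at step counter, as a function of (counter-1) % 4
def pvLetterAt (k : Nat) : String := String.ofList [pvChar (k % 4)]

theorem pvSeatA_eq_letterAt (counter : Int) (seat : String) (h1 : 1 ≤ counter) :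
    pvSeatA counter seat = pvLetterAt (counter - 1).toNat := by
  have hm : PySem.Int.mod counter 4 = counter % 4 := PySem.Int.mod_eq_emod_of_pos (by omega)
  have hr : counter % 4 = 0 ∨ counter % 4 = 1 ∨ counter % 4 = 2 ∨ counter % 4 = 3 := by omega
  rcases hr with hr | hr | hr | hr
  · have e : (counter - 1).toNat % 4 = 3 := by omega
    simp only [pvSeatA, pvLetterAt, pvChar, hm, hr, e]
    split_ifs <;> first | decide | (exfalso; first | omega | tauto)
  · have e : (counter - 1).toNat % 4 = 0 := by omega
    simp only [pvSeatA, pvLetterAt, pvChar, hm, hr, e]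
    split_ifs <;> first | decide | (exfalso; first | omega | tauto)
  · have e : (counter - 1).toNat % 4 = 1 := by omega
    simp only [pvSeatA, pvLetterAt, pvChar, hm, hr, e]
    split_ifs <;> first | decide | (exfalso; first | omega | tauto)
  · have e : (counter - 1).toNat % 4 = 2 := by omega
    simp only [pvSeatA, pvLetterAt, pvChar, hm, hr, e]
    split_ifs <;> first | decide | (exfalso; first | omega | tauto)

theorem pvSeatLoopA_eq (number : Int) : ∀ (fuel : Nat) (counter : Int) (seat : String),
    1 ≤ counter → (number + 1 - counter).toNat = fuel →
    pvSeatLoopA number counter seat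
      = (List.range (number + 1 - counter).toNat).map (fun k => pvLetterAt ((counter - 1).toNat + k)) := by
  intro fuel
  induction fuel with
  | zero =>
    intro counter seat h1 hf
    rw [pvSeatLoopA, if_neg (by omega : ¬ counter ≤ number), hf]
    simp
  | succ n ih =>
    intro counter seat h1 hf
    rw [pvSeatLoopA]
    by_cases hc : counter ≤ number
    · simp only [hc, if_true]
      rw [(hf : (number + 1 - counter).toNat = n + 1), List.range_succ_eq_map, List.map_cons,
        List.map_map]
      refine congrArg₂ List.cons (by simpa using pvSeatA_eq_letterAt counter seat h1) ?_
      have := ih (counter + 1) (pvSeatA counter seat) (by omega) (by omega)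
      rw [this, (by omega : (number + 1 - (counter + 1)).toNat = n)]
      refine List.map_congr_left ?_
      intro k _
      simp only [Function.comp]
      congr 1
      omega
    · rw [if_neg hc, (by omega : (number + 1 - counter).toNat = 0)]
      simp

-- the block construction of B, on Nat: n/4 full blocks plus a prefix of length n % 4
def pvBlocks (n : Nat) : List Char :=
  (List.replicate (n / 4) "ABCD".toList).flatten ++ "ABCD".toList.take (n % 4)

theorem pvBlocks_succ (m : Nat) : pvBlocks (m + 1) = pvBlocks m ++ [pvChar (m % 4)] := by
  by_cases h3 : m % 4 = 3
  · have hq : (m + 1) / 4 = m / 4 + 1 := by omega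
    have hr : (m + 1) % 4 = 0 := by omega
    simp only [pvBlocks, hq, hr, h3, List.replicate_succ', List.flatten_append,
      List.append_assoc]
    congr 1
  · have h4 : m % 4 = 0 ∨ m % 4 = 1 ∨ m % 4 = 2 := by omega
    have hq : (m + 1) / 4 = m / 4 := by omega
    have hr : (m + 1) % 4 = m % 4 + 1 := by omega
    simp only [pvBlocks, hq, hr, List.append_assoc]
    congr 1
    rcases h4 with h | h | h <;> rw [h] <;> decide

theorem pvBlocks_eq_range (n : Nat) :
    (pvBlocks n).map (fun c => String.ofList [c]) = (List.range n).map pvLetterAt := by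
  induction n with
  | zero => decide
  | succ m ih =>
    rw [pvBlocks_succ, List.map_append, ih, List.range_succ, List.map_append]
    rfl

-- ===== VERDICT (by name: the statement is the Claim_ definition above) =====
theorem generate_seat_letters_spec : Claim_equal_generate_seat_letters := by
  intro number _
  unfold Spec_generate_seat_letters generate_seat_letters generate_seat_letters_alt
  by_cases h : number ≤ 0
  · simp [h]
  · obtain ⟨m, rfl⟩ : ∃ m : Nat, number = (m : Int) := ⟨number.toNat, by omega⟩
    have hdm : PySem.Int.divmod? ((m : Int)) 4 = some (((m / 4 : Nat) : Int), ((m % 4 : Nat) : Int)) := by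
      simp [PySem.Int.divmod?]
      rw [Int.fdiv_eq_ediv_of_nonneg _ (by norm_num), Int.fmod_eq_emod_of_nonneg _ (by norm_num)]
      constructor <;> omega
    rw [if_neg h, if_neg h, hdm,
      pvSeatLoopA_eq (m : Int) ((m : Int) + 1 - 1).toNat 1 "" (by omega) rfl]
    simp only [PySem.List.slice_to "ABCD".toList (by positivity : (0:Int) ≤ ((m % 4 : Nat) : Int)),
      Int.toNat_natCast, (by omega : ((1:Int) - 1).toNat = 0),
      (by omega : ((m : Int) + 1 - 1).toNat = m), Nat.zero_add]
    rw [← pvBlocks_eq_range m]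
    simp [pvBlocks]
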